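-- pv_equiv track=rewrite | github.com/bina100/Index-Structure | utils.py | calGaps
-- ===== SOURCE A (Python) =====
-- def getDiffArray(num_arr):
--     """ THis method get an array of numbers and returns an array of the differences (the first number remains the same) """
--     diff_arr = [num_arr[0]]  # the first number remains the same
--     diff_arr += [num - num_arr[i] for i, num in enumerate(num_arr[1:])]  # Differences between all other numbers
--     return diff_arr
--
-- def calGaps(mailing_list):
--     """ This method get mailing list and calculates the gaps between the review_ids """
--     reviews_list = mailing_list[::2]  # get the reviewIDs only
--     freq_list = mailing_list[1::2]  # get the freq. only
--     reviews_diff_list = getDiffArray(reviews_list)  # calculates the differences between reviewIDs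
--
--     mailing_list = []
--     for (r_id, freq) in zip(reviews_diff_list, freq_list):  # merge the reviewIDs (in differences) + freq. back together
--         mailing_list.extend([r_id, freq])
--
--     return mailing_list
-- ===== SOURCE B (Python) =====
-- def calGaps(mailing_list):
--     """Single pass over mailing_list, index stepping by 2, keeping the previous
--     review id as running state; no slicing, no helper, no re-interleaving."""
--     prev = mailing_list[0]  # IndexError on empty input, like the original
--     out = []
--     i = 0
--     n = len(mailing_list)
--     while i + 1 < n:
--         if i == 0:
--             out.append(mailing_list[0])
--         else:
--             out.append(mailing_list[i] - prev)
--         out.append(mailing_list[i + 1])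
--         prev = mailing_list[i]
--         i += 2
--     return out
-- ===== Notes on version B (the rewrite author's own statement) =====
-- stated objective: simpler
-- what changed: Replaced the slice-into-two-lists + separate diff helper + zip-and-reinterleave pipeline by a single index loop over the original list stepping by 2, carrying the previous review id as running state.
import Mathlib
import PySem

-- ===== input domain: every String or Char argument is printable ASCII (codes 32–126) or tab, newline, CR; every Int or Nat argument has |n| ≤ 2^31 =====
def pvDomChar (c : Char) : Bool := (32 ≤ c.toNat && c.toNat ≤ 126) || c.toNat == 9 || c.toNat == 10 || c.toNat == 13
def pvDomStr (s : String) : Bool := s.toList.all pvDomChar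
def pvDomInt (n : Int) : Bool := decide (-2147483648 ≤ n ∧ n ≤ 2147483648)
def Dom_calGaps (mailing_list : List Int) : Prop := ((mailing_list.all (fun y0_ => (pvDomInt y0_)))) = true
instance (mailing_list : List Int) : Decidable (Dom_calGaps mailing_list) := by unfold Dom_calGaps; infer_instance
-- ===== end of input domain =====

-- B replaces A's slice/diff-helper/zip-reinterleave pipeline by one index loop stepping by 2
-- with the previous review id as running state (objective: simpler). Return-value equivalence.

-- ===== PORT A =====
-- port of getDiffArray; num_arr[0] raises IndexError on [], which Pre_ excludes
def getDiffArrayA (num_arr : List Int) : List Int :=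
  match PySem.List.pyGet? num_arr 0 with
  | none => []  -- Python raises IndexError here; unreachable under Pre_calGaps
  | some h =>
      [h] ++ (PySem.List.enumerate (PySem.List.slice num_arr (some 1) none)).map
             (fun p => p.2 - PySem.List.pyGetD num_arr p.1 0)  -- index always in range

def calGaps (mailing_list : List Int) : List Int :=
  let reviews_list := (PySem.List.slice? mailing_list none none 2).getD []  -- step 2 ≠ 0: never none
  let freq_list := (PySem.List.slice? mailing_list (some 1) none 2).getD []
  let reviews_diff_list := getDiffArrayA reviews_list
  (List.zip reviews_diff_list freq_list).foldl (fun acc p => acc ++ [p.1, p.2]) []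

-- ===== PORT B =====
-- the while loop of Source B after its first iteration: prev is the review id two slots back
def calGapsLoop (prev : Int) : List Int → List Int
  | r :: f :: rest => (r - prev) :: f :: calGapsLoop r rest
  | _ => []  -- i + 1 < n fails: stop (drops a trailing unmatched review)

def calGaps_alt (mailing_list : List Int) : List Int :=
  match mailing_list with
  | r :: f :: rest => r :: f :: calGapsLoop r rest  -- first iteration: raw review id
  | _ => []  -- empty (Python B raises, outside Pre_) or single element: loop never runs

-- ===== PRECONDITION & SPEC =====
-- Pre_ excludes only the empty list, on which both Pythons raise IndexError (num_arr[0] / mailing_list[0]).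
def Pre_calGaps (mailing_list : List Int) : Prop := mailing_list ≠ []
instance (mailing_list : List Int) : Decidable (Pre_calGaps mailing_list) := by unfold Pre_calGaps; infer_instance
def pvWitness_calGaps : List Int := [100, 2, 105, 3, 111, 1]

def Spec_calGaps (mailing_list : List Int) (out : List Int) : Prop := out = calGaps_alt mailing_list
instance (mailing_list : List Int) (out : List Int) : Decidable (Spec_calGaps mailing_list out) := by unfold Spec_calGaps; infer_instance

-- ===== CLAIM (what is proved, stated in full; the proofs are below) =====
def Claim_equal_calGaps : Prop := ∀ (mailing_list : List Int), Dom_calGaps mailing_list → Pre_calGaps mailing_list → Spec_calGaps mailing_list (calGaps mailing_list)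

-- ===== LEMMAS AND PROOFS =====

-- proof-side vocabulary: elements at even / odd positions, running differences, interleaving
def pvEvens : List Int → List Int
  | [] => []
  | [a] => [a]
  | a :: _ :: t => a :: pvEvens t

def pvOdds : List Int → List Int
  | [] => []
  | _ :: t => pvEvens t

def pvDiffFrom (p : Int) : List Int → List Int
  | [] => []
  | x :: t => (x - p) :: pvDiffFrom x t

def pvInter (D E : List Int) : List Int := (List.zip D E).flatMap (fun q => [q.1, q.2])

lemma pv_filterMap_range_evens (xs : List Int) :
    (List.range ((xs.length + 1) / 2)).filterMap (fun k => xs[2 * k]?) = pvEvens xs := by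
  induction xs using pvEvens.induct with
  | case1 => simp [pvEvens]
  | case2 a => simp [pvEvens]
  | case3 a b t ih =>
    have hlen : ((a::b::t).length + 1) / 2 = (t.length + 1) / 2 + 1 := by
      simp [List.length_cons]; omega
    rw [hlen, List.range_succ_eq_map, List.filterMap_cons]
    simp [List.filterMap_map, Function.comp, pvEvens, Nat.mul_succ]
    exact ih

lemma pv_slice_even (xs : List Int) :
    PySem.List.slice? xs none none 2 = some (pvEvens xs) := by
  simp [PySem.List.slice?, PySem.List.sliceIndices]
  have hc : (if 0 < xs.length then (((xs.length : Int) + 2 - 1) / 2).toNat else 0)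
      = (xs.length + 1) / 2 := by split <;> omega
  have hi : ∀ k : Nat, ((2 * (k : Int)).toNat) = 2 * k := by intro k; omega
  rw [hc]
  simpa [hi] using pv_filterMap_range_evens xs

lemma pv_slice_odd (xs : List Int) :
    PySem.List.slice? xs (some 1) none 2 = some (pvOdds xs) := by
  cases xs with
  | nil => simp [PySem.List.slice?, PySem.List.sliceIndices, pvOdds]
  | cons a t =>
    simp [PySem.List.slice?, PySem.List.sliceIndices, pvOdds]
    have hc : (if 0 < t.length then (((t.length : Int) + 2 - 1) / 2).toNat else 0)
        = (t.length + 1) / 2 := by split <;> omega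
    have hi : ∀ k : Nat, ((1 + 2 * (k : Int)).toNat) = 2 * k + 1 := by intro k; omega
    rw [hc]
    have hg : ∀ k : Nat, (a::t)[2 * k + 1]? = t[2 * k]? := by intro k; simp
    simpa [hi, hg] using pv_filterMap_range_evens t

lemma pv_enum_map (t : List Int) (s : Nat) (A : List Int) (hs : s + t.length ≤ A.length) :
    (PySem.List.enumerate t (s : Int)).map (fun p => p.2 - PySem.List.pyGetD A p.1 0) =
      t.zipWith (fun x y => x - y) (A.drop s) := by
  induction t generalizing s with
  | nil => simp [PySem.List.enumerate_nil]
  | cons x t ih =>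
    have hsl : s < A.length := by simp at hs; omega
    rw [PySem.List.enumerate_cons, List.map_cons, List.drop_eq_getElem_cons hsl,
        List.zipWith_cons_cons]
    have h1 : PySem.List.pyGetD A (s : Int) 0 = A[s] := by
      simp [PySem.List.pyGetD_natCast, List.getD_eq_getElem?_getD, hsl]
    have h2 : ((s : Int) + 1) = ((s + 1 : Nat) : Int) := by push_cast; ring
    rw [h1, h2, ih (s + 1) (by simp at hs ⊢; omega)]

lemma pv_diffFrom_zipWith (t : List Int) (p : Int) :
    t.zipWith (fun x y => x - y) (p :: t) = pvDiffFrom p t := by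
  induction t generalizing p with
  | nil => simp [pvDiffFrom]
  | cons x t ih => simp [pvDiffFrom, List.zipWith, ih]

lemma pv_getDiffArrayA (h : Int) (t : List Int) :
    getDiffArrayA (h :: t) = h :: pvDiffFrom h t := by
  unfold getDiffArrayA
  rw [PySem.List.slice_from_one]
  have he : (PySem.List.enumerate t).map (fun p => p.2 - PySem.List.pyGetD (h :: t) p.1 0)
      = t.zipWith (fun x y => x - y) (h :: t) := by
    simpa using pv_enum_map t 0 (h :: t) (by simp)
  simp only [PySem.List.pyGet?, PySem.List.pyIdx?]
  simp only [List.tail_cons]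
  simp [he, pv_diffFrom_zipWith]

lemma pvInter_cons (a b : Int) (D E : List Int) :
    pvInter (a :: D) (b :: E) = a :: b :: pvInter D E := by simp [pvInter]

lemma pvEvens_cons (a : Int) (t : List Int) : pvEvens (a :: t) = a :: pvOdds t := by
  cases t <;> rfl

lemma pv_go_eq (l : List Int) (p : Int) :
    calGapsLoop p l = pvInter (pvDiffFrom p (pvEvens l)) (pvOdds l) := by
  induction p, l using calGapsLoop.induct with
  | case1 p r f rest ih =>
    show (r - p) :: f :: calGapsLoop r rest = _
    rw [pvEvens_cons,
        show pvDiffFrom p (r :: pvOdds (f :: rest)) = (r - p) :: pvDiffFrom r (pvOdds (f :: rest)) from rfl,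
        show pvOdds (r :: f :: rest) = pvEvens (f :: rest) from rfl,
        pvEvens_cons, pvInter_cons,
        show pvOdds (f :: rest) = pvEvens rest from rfl, ih]
  | case2 t p h =>
    cases t with
    | nil => simp [calGapsLoop, pvEvens, pvOdds, pvDiffFrom, pvInter]
    | cons x t =>
      cases t with
      | nil => simp [calGapsLoop, pvEvens, pvOdds, pvDiffFrom, pvInter]
      | cons y t => exact absurd rfl (fun hh => h x y t hh)

-- ===== VERDICT (by name: the statement is the Claim_ definition above) =====
theorem calGaps_spec : Claim_equal_calGaps := by
  intro ml _ hpre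
  unfold Spec_calGaps calGaps
  rw [pv_slice_even, pv_slice_odd]
  cases ml with
  | nil => exact absurd rfl hpre
  | cons r rest =>
    simp only [Option.getD_some, pvEvens_cons, pv_getDiffArrayA]
    rw [show pvOdds (r :: rest) = pvEvens rest from rfl]
    cases rest with
    | nil => rfl
    | cons f rest' =>
      rw [pvEvens_cons]
      have hfold : ∀ (D E : List Int),
          (List.zip D E).foldl (fun acc p => acc ++ [p.1, p.2]) ([] : List Int) = pvInter D E := by
        intro D E
        simpa [pvInter] using
          (PySem.List.foldl_append_eq_flatMap (fun p : Int × Int => [p.1, p.2]) (List.zip D E) ([] : List Int))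
      rw [hfold, pvInter_cons,
          show calGaps_alt (r :: f :: rest') = r :: f :: calGapsLoop r rest' from rfl, pv_go_eq,
          show pvOdds (f :: rest') = pvEvens rest' from rfl]
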